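-- pv_equiv track=rewrite | github.com/contour-terminal/contour | test/demo_math_symbols.py | right_square
-- ===== SOURCE A (Python) =====
-- RIGHT_SQ_UPPER = "\u23A4"           # ⎤
--
-- RIGHT_SQ_EXT   = "\u23A5"           # ⎥
--
-- RIGHT_SQ_LOWER = "\u23A6"           # ⎦
--
-- def right_square(height: int) -> list[str]:
--     """Build a right square bracket of given height."""
--     height = max(2, height)
--     lines = []
--     for i in range(height):
--         if i == 0:
--             lines.append(RIGHT_SQ_UPPER)
--         elif i == height - 1:
--             lines.append(RIGHT_SQ_LOWER)
--         else:
--             lines.append(RIGHT_SQ_EXT)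
--     return lines
-- ===== SOURCE B (Python) =====
-- RIGHT_SQ_UPPER = "\u23A4"
-- RIGHT_SQ_EXT   = "\u23A5"
-- RIGHT_SQ_LOWER = "\u23A6"
--
-- def right_square(height: int) -> list[str]:
--     """Build a right square bracket of given height."""
--     lines = [RIGHT_SQ_UPPER, RIGHT_SQ_LOWER]
--     for _ in range(height - 2):
--         lines.insert(-1, RIGHT_SQ_EXT)
--     return lines
-- ===== Notes on version B (the rewrite author's own statement) =====
-- stated objective: alternative
-- what changed: Instead of A's indexed loop with three-way branching per line, B seeds the minimal two-line bracket [UPPER, LOWER] and grows it by repeatedly inserting an extension line before the closing corner (range(height-2) is empty for height<=2, so no clamp is needed).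
import Mathlib
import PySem

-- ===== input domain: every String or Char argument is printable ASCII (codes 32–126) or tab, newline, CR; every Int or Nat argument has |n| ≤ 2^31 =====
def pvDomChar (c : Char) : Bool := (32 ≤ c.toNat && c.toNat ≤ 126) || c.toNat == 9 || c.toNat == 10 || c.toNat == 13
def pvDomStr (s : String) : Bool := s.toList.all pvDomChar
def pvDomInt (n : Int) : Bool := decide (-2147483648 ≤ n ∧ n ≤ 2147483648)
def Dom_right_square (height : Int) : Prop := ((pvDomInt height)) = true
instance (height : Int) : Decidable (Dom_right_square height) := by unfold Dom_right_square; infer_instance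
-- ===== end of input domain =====

-- B grows the minimal two-line bracket by inserting extensions before the closing corner, instead of A's per-index loop with three-way branching; objective: alternative (same cost).


def RIGHT_SQ_UPPER : String := "\u23A4"
def RIGHT_SQ_EXT   : String := "\u23A5"
def RIGHT_SQ_LOWER : String := "\u23A6"

-- ===== PORT A =====
def right_square (height : Int) : List String :=
  let height := max 2 height
  (PySem.List.pyRange 0 height 1).foldl
    (fun lines i =>
      if i == 0 then lines ++ [RIGHT_SQ_UPPER]
      else if i == height - 1 then lines ++ [RIGHT_SQ_LOWER]
      else lines ++ [RIGHT_SQ_EXT]) []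

-- ===== PORT B =====
def right_square_alt (height : Int) : List String :=
  (PySem.List.pyRange 0 (height - 2) 1).foldl
    (fun lines _ => PySem.List.insert lines (-1) RIGHT_SQ_EXT)
    [RIGHT_SQ_UPPER, RIGHT_SQ_LOWER]

-- ===== PRECONDITION & SPEC =====
def Spec_right_square (height : Int) (out : List String) : Prop := out = right_square_alt height
instance (height : Int) (out : List String) : Decidable (Spec_right_square height out) := by unfold Spec_right_square; infer_instance

-- ===== CLAIM (what is proved, stated in full; the proofs are below) =====
def Claim_equal_right_square : Prop := ∀ (height : Int), Dom_right_square height → Spec_right_square height (right_square height)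

-- ===== LEMMAS AND PROOFS =====

-- the canonical value both programs compute
def rs_canon (k : Nat) : List String :=
  RIGHT_SQ_UPPER :: (List.replicate k RIGHT_SQ_EXT ++ [RIGHT_SQ_LOWER])

theorem right_square_loop_eq_map (h : Int) :
    (PySem.List.pyRange 0 h 1).foldl
      (fun lines i =>
        if i == 0 then lines ++ [RIGHT_SQ_UPPER]
        else if i == h - 1 then lines ++ [RIGHT_SQ_LOWER]
        else lines ++ [RIGHT_SQ_EXT]) [] =
    (PySem.List.pyRange 0 h 1).map
      (fun i => if i == 0 then RIGHT_SQ_UPPER else if i == h - 1 then RIGHT_SQ_LOWER else RIGHT_SQ_EXT) := by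
  have hf : (fun (lines : List String) (i : Int) =>
      if i == 0 then lines ++ [RIGHT_SQ_UPPER]
      else if i == h - 1 then lines ++ [RIGHT_SQ_LOWER]
      else lines ++ [RIGHT_SQ_EXT]) =
      (fun (lines : List String) (i : Int) =>
        lines ++ [if i == 0 then RIGHT_SQ_UPPER else if i == h - 1 then RIGHT_SQ_LOWER else RIGHT_SQ_EXT]) := by
    funext lines i; split_ifs <;> rfl
  rw [hf]
  exact PySem.List.foldl_append_singleton_eq_map
    (fun i => if i == 0 then RIGHT_SQ_UPPER else if i == h - 1 then RIGHT_SQ_LOWER else RIGHT_SQ_EXT)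
    (PySem.List.pyRange 0 h 1) []

theorem right_square_eq_canon (height : Int) :
    right_square height = rs_canon (max 2 height - 2).toNat := by
  unfold right_square rs_canon
  set h := max 2 height with hh
  have h2 : 2 ≤ h := le_max_left _ _
  rw [right_square_loop_eq_map, PySem.List.pyRange_one, List.map_map]
  apply List.ext_getElem
  · simp [List.length_replicate]
    omega
  · intro j hj1 hj2
    simp only [List.length_map, List.length_range] at hj1
    have hjh : j < h.toNat := by omega
    simp only [List.getElem_map, List.getElem_range, Function.comp]
    rcases j with _ | k
    · simp
    · have hm : k < (h - 2).toNat + 1 := by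
        simp only [List.length_cons, List.length_append, List.length_replicate,
          List.length_nil] at hj2
        omega
      have hne0 : ((k:Int) + 1) ≠ 0 := by omega
      simp only [List.getElem_cons_succ]
      by_cases hk : k < (h - 2).toNat
      · have hnel : ((k:Int) + 1) ≠ h - 1 := by omega
        rw [List.getElem_append_left (by simpa using hk)]
        simp [hne0, hnel]
      · have hke : k = (h - 2).toNat := by omega
        subst hke
        have hl : max (h - 2) 0 + 1 = h - 1 := by omega
        have hne : h - 1 ≠ 0 := by omega
        rw [List.getElem_append_right (by simp)]
        simp [hl, hne]

-- inserting at position -1 into a canonical bracket adds one extension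
theorem rs_insert_canon (k : Nat) :
    PySem.List.insert (rs_canon k) (-1) RIGHT_SQ_EXT = rs_canon (k + 1) := by
  have hlen : (rs_canon k).length = k + 2 := by simp [rs_canon]
  simp only [PySem.List.insert, PySem.List.sliceIndices, hlen]
  norm_num
  have hm : (max (-1 + ((k:Int) + 2)) 0).toNat = k + 1 := by omega
  rw [hm]
  simp only [rs_canon, List.take_succ_cons, List.drop_succ_cons,
    List.take_append_of_le_length (by simp : k ≤ (List.replicate k RIGHT_SQ_EXT).length),
    List.drop_append_of_le_length (by simp : k ≤ (List.replicate k RIGHT_SQ_EXT).length),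
    List.take_replicate, List.drop_replicate, List.replicate_succ']
  simp

-- a foldl whose step ignores the element is an iterate
theorem foldl_const_iterate {α β : Type} (g : α → α) :
    ∀ (l : List β) (init : α), l.foldl (fun acc _ => g acc) init = g^[l.length] init := by
  intro l
  induction l with
  | nil => intro init; rfl
  | cons x xs ih =>
      intro init
      simp only [List.foldl_cons, List.length_cons, Function.iterate_succ_apply]
      exact ih (g init)

theorem right_square_alt_eq_canon (height : Int) :
    right_square_alt height = rs_canon (height - 2).toNat := by
  unfold right_square_alt
  rw [foldl_const_iterate, PySem.List.length_pyRange_one]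
  have h0 : ([RIGHT_SQ_UPPER, RIGHT_SQ_LOWER] : List String) = rs_canon 0 := by
    simp [rs_canon]
  rw [h0]
  have : (height - 2 - 0).toNat = (height - 2).toNat := by omega
  rw [this]
  generalize (height - 2).toNat = n
  induction n with
  | zero => rfl
  | succ k ih =>
      rw [Function.iterate_succ_apply', ih, rs_insert_canon]

-- ===== VERDICT (by name: the statement is the Claim_ definition above) =====
theorem right_square_spec : Claim_equal_right_square := by
  intro height _
  unfold Spec_right_square
  rw [right_square_eq_canon, right_square_alt_eq_canon]
  congr 1
  omega
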